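-- pv_equiv track=rewrite | github.com/royal-dargon/mc-learn | mLearning/final_work2022/bert_lstm/word_vec.py | fix_empty
-- ===== SOURCE A (Python) =====
-- def fix_empty(data, label):
--     n = len(data)
--     res_data = []
--     res_label = []
--     for i in range(n):
--         if len(data[i]) > 1:
--             res_label.append(label[i])
--             res_data.append(data[i])
--     return res_data, res_label
-- ===== SOURCE B (Python) =====
-- def fix_empty(data, label):
--     # Divide and conquer: the kept rows of data[lo:hi] (and their labels) are the
--     # kept rows of the left half followed by those of the right half.
--     def go(lo, hi):
--         if hi - lo == 0:
--             return [], []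
--         if hi - lo == 1:
--             if len(data[lo]) > 1:
--                 return [data[lo]], [label[lo]]
--             return [], []
--         mid = (lo + hi) // 2
--         dl, ll = go(lo, mid)
--         dr, lr = go(mid, hi)
--         return dl + dr, ll + lr
--     return go(0, len(data))
-- ===== Notes on version B (the rewrite author's own statement) =====
-- stated objective: alternative
-- what changed: Replaces the single linear loop with two synchronized mutable accumulators by a divide-and-conquer recursion: the index range is split in halves, each half is solved recursively down to single elements, and the kept (data,label) pieces are combined by list concatenation.
import Mathlib
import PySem

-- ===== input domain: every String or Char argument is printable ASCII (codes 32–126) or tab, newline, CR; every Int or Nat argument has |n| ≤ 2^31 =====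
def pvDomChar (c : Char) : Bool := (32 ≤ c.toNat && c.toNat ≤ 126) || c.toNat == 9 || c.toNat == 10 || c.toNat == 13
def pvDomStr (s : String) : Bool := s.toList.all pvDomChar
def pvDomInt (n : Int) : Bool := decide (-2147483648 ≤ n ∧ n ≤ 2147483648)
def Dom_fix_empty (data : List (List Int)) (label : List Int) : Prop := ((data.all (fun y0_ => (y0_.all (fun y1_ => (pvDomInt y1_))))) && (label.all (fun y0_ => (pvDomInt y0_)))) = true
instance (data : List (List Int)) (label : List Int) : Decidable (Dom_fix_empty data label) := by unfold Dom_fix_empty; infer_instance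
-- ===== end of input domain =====

-- B replaces A's single accumulator loop by a divide-and-conquer recursion over index halves; objective: alternative decomposition (same results).

-- ===== PORT A =====
-- literal transliteration of A: loop over range(n), appending to two accumulators
def fix_empty (data : List (List Int)) (label : List Int) : List (List Int) × List Int :=
  (List.range data.length).foldl
    (fun (st : List (List Int) × List Int) (i : Nat) =>
      if 1 < (PySem.List.pyGetD data (i : Int) []).length then
        (st.1 ++ [PySem.List.pyGetD data (i : Int) []],
         st.2 ++ [PySem.List.pyGetD label (i : Int) 0])
      else st)
    ([], [])

-- ===== PORT B =====
-- helper go(lo, hi) of Source B: divide-and-conquer on the index range [lo, hi).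
-- The extra fuel argument (initially hi - lo, an upper bound on the recursion depth)
-- only makes the recursion structural; it never alters the computation.
def fix_empty_go (data : List (List Int)) (label : List Int) :
    Nat → Nat → Nat → List (List Int) × List Int
  | 0, _, _ => ([], [])
  | fuel + 1, lo, hi =>
    if hi - lo = 0 then ([], [])
    else if hi - lo = 1 then
      if 1 < (PySem.List.pyGetD data (lo : Int) []).length then
        ([PySem.List.pyGetD data (lo : Int) []], [PySem.List.pyGetD label (lo : Int) 0])
      else ([], [])
    else
      let mid := (lo + hi) / 2
      let L := fix_empty_go data label fuel lo mid
      let R := fix_empty_go data label fuel mid hi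
      (L.1 ++ R.1, L.2 ++ R.2)

def fix_empty_alt (data : List (List Int)) (label : List Int) : List (List Int) × List Int :=
  fix_empty_go data label data.length 0 data.length

-- ===== PRECONDITION & SPEC =====
-- Pre_ excludes exactly the inputs where Python A raises IndexError: a kept index i
-- (len(data[i]) > 1) that is out of range for label.
def Pre_fix_empty (data : List (List Int)) (label : List Int) : Prop :=
  ∀ i ∈ List.range data.length, 1 < (data.getD i []).length → i < label.length
instance (data : List (List Int)) (label : List Int) : Decidable (Pre_fix_empty data label) := by
  unfold Pre_fix_empty; infer_instance
def pvWitness_fix_empty : List (List Int) × List Int := ([[1, 2], [3]], [5, 6])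

def Spec_fix_empty (data : List (List Int)) (label : List Int) (out : List (List Int) × List Int) : Prop := out = fix_empty_alt data label
instance (data : List (List Int)) (label : List Int) (out : List (List Int) × List Int) : Decidable (Spec_fix_empty data label out) := by unfold Spec_fix_empty; infer_instance

-- ===== CLAIM (what is proved, stated in full; the proofs are below) =====
def Claim_equal_fix_empty : Prop := ∀ (data : List (List Int)) (label : List Int), Dom_fix_empty data label → Pre_fix_empty data label → Spec_fix_empty data label (fix_empty data label)

-- ===== LEMMAS AND PROOFS =====
theorem foldl_two_acc {α β γ : Type} (c : α → Bool) (g : α → β × γ) :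
    ∀ (l : List α) (aD : List β) (aL : List γ),
      l.foldl
        (fun (st : List β × List γ) i =>
          if c i then (st.1 ++ [(g i).1], st.2 ++ [(g i).2]) else st)
        (aD, aL)
      = (aD ++ ((l.filter c).map g).map Prod.fst,
         aL ++ ((l.filter c).map g).map Prod.snd) := by
  intro l
  induction l with
  | nil => simp
  | cons x xs ih =>
      intro aD aL
      by_cases h : c x
      · simp [h, ih]
      · simp [h, ih]

-- characterisation of B's divide-and-conquer helper on [lo, lo+n), given enough fuel
theorem fix_empty_go_eq (data : List (List Int)) (label : List Int) :
    ∀ (fuel n lo : Nat), n ≤ fuel →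
      fix_empty_go data label fuel lo (lo + n)
      = (((List.range' lo n).filter
            (fun (i : Nat) => decide (1 < (PySem.List.pyGetD data (i : Int) []).length))).map
            (fun (i : Nat) => PySem.List.pyGetD data (i : Int) []),
         ((List.range' lo n).filter
            (fun (i : Nat) => decide (1 < (PySem.List.pyGetD data (i : Int) []).length))).map
            (fun (i : Nat) => PySem.List.pyGetD label (i : Int) 0)) := by
  intro fuel
  induction fuel with
  | zero =>
      intro n lo hn
      have : n = 0 := by omega
      subst this
      simp [fix_empty_go]
  | succ fuel ih =>
      intro n lo hn
      match n with
      | 0 => simp [fix_empty_go]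
      | 1 =>
          rw [fix_empty_go]
          by_cases h : 1 < (PySem.List.pyGetD data (lo : Int) []).length <;>
            simp_all [List.range']
      | (m + 2) =>
          rw [fix_empty_go]
          have hne0 : ¬ (lo + (m + 2) - lo = 0) := by omega
          have hne1 : ¬ (lo + (m + 2) - lo = 1) := by omega
          rw [if_neg hne0, if_neg hne1]
          have hlb : lo + 1 ≤ (lo + (lo + (m + 2))) / 2 :=
            (Nat.le_div_iff_mul_le (by omega)).mpr (by omega)
          have hub : (lo + (lo + (m + 2))) / 2 < lo + (m + 2) :=
            (Nat.div_lt_iff_lt_mul (by omega)).mpr (by omega)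
          set k : Nat := (lo + (lo + (m + 2))) / 2 - lo with hk
          have hk1 : 1 ≤ k := by omega
          have hk2 : k ≤ m + 1 := by omega
          have hmid' : (lo + (lo + (m + 2))) / 2 = lo + k := by omega
          have h1 := ih k lo (by omega)
          have h2 := ih (m + 2 - k) (lo + k) (by omega)
          simp only [hmid']
          have h2' : fix_empty_go data label fuel (lo + k) (lo + (m + 2))
              = fix_empty_go data label fuel (lo + k) ((lo + k) + (m + 2 - k)) := by
            congr 1; omega
          rw [h1, h2', h2]
          have hsplit : List.range' lo (m + 2) = List.range' lo k ++ List.range' (lo + k) (m + 2 - k) := by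
            have h : List.range' lo k 1 ++ List.range' (lo + 1 * k) (m + 2 - k) 1
                = List.range' lo (k + (m + 2 - k)) 1 := List.range'_append
            simp only [one_mul] at h
            rw [show m + 2 = k + (m + 2 - k) by omega, ← h,
              show k + (m + 2 - k) - k = m + 2 - k from by omega]
          simp only [hsplit, List.filter_append, List.map_append]

-- ===== VERDICT (by name: the statement is the Claim_ definition above) =====
theorem fix_empty_spec : Claim_equal_fix_empty := by
  intro data label _ _
  unfold Spec_fix_empty fix_empty fix_empty_alt
  have hg := fix_empty_go_eq data label data.length data.length 0 (le_refl _)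
  rw [Nat.zero_add] at hg
  rw [hg, ← List.range_eq_range']
  simpa [Function.comp] using foldl_two_acc
    (fun (i : Nat) => decide (1 < (PySem.List.pyGetD data (i : Int) []).length))
    (fun (i : Nat) => (PySem.List.pyGetD data (i : Int) [], PySem.List.pyGetD label (i : Int) 0))
    (List.range data.length) [] []
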